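-- pv_equiv track=rewrite | github.com/kuro-vale/kuro-python | extra/knight_chess.py | get_y_and_x
-- ===== SOURCE A (Python) =====
-- def get_y_and_x(chessboard, position):
--     x, y = 0, 0
--     for i in chessboard:
--         try:
--             x = i.index(position)
--             y = chessboard.index(i)
--         except ValueError:
--             pass
--     return x, y
-- ===== SOURCE B (Python) =====
-- def get_y_and_x(chessboard, position):
--     for row in reversed(chessboard):
--         if position in row:
--             return row.index(position), chessboard.index(row)
--     return 0, 0
-- ===== Notes on version B (the rewrite author's own statement) =====
-- stated objective: simpler
-- what changed: B scans the board back-to-front and returns on the first (i.e. overall last) row containing the position, instead of A's forward full scan that repeatedly overwrites x,y and re-indexes the board on every match.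
import Mathlib
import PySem

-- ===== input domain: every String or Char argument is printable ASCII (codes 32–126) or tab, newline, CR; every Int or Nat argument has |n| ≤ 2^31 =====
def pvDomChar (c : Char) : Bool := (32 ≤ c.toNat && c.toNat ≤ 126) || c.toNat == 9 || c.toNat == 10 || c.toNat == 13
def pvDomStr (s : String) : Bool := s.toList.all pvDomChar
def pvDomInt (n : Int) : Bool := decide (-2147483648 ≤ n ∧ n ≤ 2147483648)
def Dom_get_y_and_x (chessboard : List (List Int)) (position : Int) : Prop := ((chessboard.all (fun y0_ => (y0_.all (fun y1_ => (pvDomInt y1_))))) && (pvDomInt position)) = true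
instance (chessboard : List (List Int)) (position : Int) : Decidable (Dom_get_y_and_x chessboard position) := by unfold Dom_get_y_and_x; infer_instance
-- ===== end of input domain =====

-- B rewrites A as a back-to-front scan with early exit: same values, plainer control flow.
-- ===== PORT A =====
def get_y_and_x (chessboard : List (List Int)) (position : Int) : Int × Int :=
  chessboard.foldl (fun s i =>
    match PySem.List.index? i position with
    | none => s                      -- ValueError from i.index(position): pass
    | some x =>
      match PySem.List.index? chessboard i with
      | none => ((x : Int), s.2)     -- unreachable: i is an element of chessboard
      | some y => ((x : Int), (y : Int))) (0, 0)

-- ===== PORT B =====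
def altScan (chessboard : List (List Int)) (position : Int) : List (List Int) → Int × Int
  | [] => (0, 0)
  | r :: rest =>
    if position ∈ r then
      (((PySem.List.index? r position).getD 0 : Nat), ((PySem.List.index? chessboard r).getD 0 : Nat))
    else altScan chessboard position rest

def get_y_and_x_alt (chessboard : List (List Int)) (position : Int) : Int × Int :=
  altScan chessboard position chessboard.reverse

-- ===== PRECONDITION & SPEC =====
def Spec_get_y_and_x (chessboard : List (List Int)) (position : Int) (out : Int × Int) : Prop := out = get_y_and_x_alt chessboard position
instance (chessboard : List (List Int)) (position : Int) (out : Int × Int) : Decidable (Spec_get_y_and_x chessboard position out) := by unfold Spec_get_y_and_x; infer_instance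

-- ===== CLAIM (what is proved, stated in full; the proofs are below) =====
def Claim_equal_get_y_and_x : Prop := ∀ (chessboard : List (List Int)) (position : Int), Dom_get_y_and_x chessboard position → Spec_get_y_and_x chessboard position (get_y_and_x chessboard position)

-- ===== LEMMAS AND PROOFS =====

theorem altScan_eq_foldl (cb : List (List Int)) (pos : Int) :
    ∀ (m : List (List Int)), (∀ r ∈ m, r ∈ cb) →
      altScan cb pos m = m.reverse.foldl (fun s i =>
        match PySem.List.index? i pos with
        | none => s
        | some x =>
          match PySem.List.index? cb i with
          | none => ((x : Int), s.2)
          | some y => ((x : Int), (y : Int))) (0, 0) := by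
  intro m
  induction m with
  | nil => intro _; rfl
  | cons r rest ih =>
    intro hmem
    have hr : r ∈ cb := hmem r (List.mem_cons_self ..)
    have hrest : ∀ q ∈ rest, q ∈ cb := fun q hq => hmem q (List.mem_cons_of_mem _ hq)
    simp only [List.reverse_cons, List.foldl_append, List.foldl_cons, List.foldl_nil]
    by_cases hp : pos ∈ r
    · obtain ⟨x, hx⟩ := Option.isSome_iff_exists.mp ((PySem.List.index?_isSome_iff r pos).mpr hp)
      obtain ⟨y, hy⟩ := Option.isSome_iff_exists.mp ((PySem.List.index?_isSome_iff cb r).mpr hr)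
      simp only [altScan, if_pos hp, PySem.List.index?_eq_idxOf?] at *
      simp [hx, hy]
    · have hx : PySem.List.index? r pos = none := (PySem.List.index?_eq_none_iff r pos).mpr hp
      simp only [altScan, if_neg hp, hx]
      exact ih hrest

-- ===== VERDICT (by name: the statement is the Claim_ definition above) =====
theorem get_y_and_x_spec : Claim_equal_get_y_and_x := by
  intro cb pos _
  unfold Spec_get_y_and_x get_y_and_x get_y_and_x_alt
  rw [altScan_eq_foldl cb pos cb.reverse (fun r hr => List.mem_reverse.mp hr), List.reverse_reverse]
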